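-- pv_equiv track=rewrite | github.com/AlvaroDuenas/orange3-renovo | addon/orangecontrib/example/widgets/elements/utils.py | sum_spectrum
-- ===== SOURCE A (Python) =====
-- def sum_spectrum(mz_array, i_array):
--     ''' calculates the sum of all spectra accross the matrix. '''
--
--     total_spectra = dict()
--     for i in range(len(mz_array)):
--         for j in range(len(mz_array[i])):
--             if mz_array[i][j] == 0 and j != 0:
--                 break
--             if mz_array[i][j] in total_spectra.keys():
--                 total_spectra[mz_array[i][j]] += i_array[i][j]
--             else:
--                 total_spectra[mz_array[i][j]] = i_array[i][j]
--     total_spectra = dict(sorted(total_spectra.items()))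
--     mz_values = list(total_spectra.keys())
--     i_values = list(total_spectra.values())
--     return mz_values[0:1000], i_values[0:1000]
-- ===== SOURCE B (Python) =====
-- def sum_spectrum(mz_array, i_array):
--     ''' calculates the sum of all spectra accross the matrix. '''
--     pairs = []
--     for mz_row, i_row in zip(mz_array, i_array):
--         for j, (mz, iv) in enumerate(zip(mz_row, i_row)):
--             if mz == 0 and j != 0:
--                 break
--             pairs.append((mz, iv))
--     pairs.sort(key=lambda p: p[0])
--     if not pairs:
--         return [], []
--     grouped = []
--     cur_mz, cur_sum = pairs[0]
--     for mz, iv in pairs[1:]: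
--         if mz == cur_mz:
--             cur_sum += iv
--         else:
--             grouped.append((cur_mz, cur_sum))
--             cur_mz, cur_sum = mz, iv
--     grouped.append((cur_mz, cur_sum))
--     grouped = grouped[:1000]
--     return [p[0] for p in grouped], [p[1] for p in grouped]
-- ===== Notes on version B (the rewrite author's own statement) =====
-- stated objective: alternative
-- what changed: B replaces A's dict accumulation followed by a full sort of the items with a flat list of (mz, intensity) events, one stable sort by mz, and a single linear scan that sums adjacent equal-mz runs while building the first 1000 groups.
-- outside the precondition, e.g. on sum_spectrum([[]], []): A returns ([], []), B returns ([], [])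
import Mathlib
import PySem

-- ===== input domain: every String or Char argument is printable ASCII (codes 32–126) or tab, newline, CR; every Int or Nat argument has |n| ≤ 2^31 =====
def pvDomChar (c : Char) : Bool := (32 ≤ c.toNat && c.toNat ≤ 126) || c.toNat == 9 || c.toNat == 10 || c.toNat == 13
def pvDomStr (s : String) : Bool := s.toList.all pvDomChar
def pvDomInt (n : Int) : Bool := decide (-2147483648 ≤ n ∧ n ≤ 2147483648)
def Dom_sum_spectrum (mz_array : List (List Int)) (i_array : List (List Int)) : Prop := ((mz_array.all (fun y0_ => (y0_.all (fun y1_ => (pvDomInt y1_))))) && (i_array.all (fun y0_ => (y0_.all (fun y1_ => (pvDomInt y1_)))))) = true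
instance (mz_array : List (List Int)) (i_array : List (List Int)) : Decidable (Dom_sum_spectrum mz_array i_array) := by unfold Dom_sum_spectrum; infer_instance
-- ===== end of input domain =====

-- B replaces A's dict accumulation + full sort of the items by a flat event list, one
-- stable sort by mz, and a single linear grouping scan (objective: alternative; return
-- value only, neither version mutates its arguments).

-- ===== PORT A =====
-- inner loop 'for j in range(len(mz_array[i])): …' with its break, j an index
def pvRowA (mzRow iRow : List Int) (j : Nat) (d : PySem.Dict Int Int) : PySem.Dict Int Int :=
  if _h : j < mzRow.length then
    let mzv := PySem.List.pyGetD mzRow (j : Int) 0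
    if mzv == 0 && (j != 0) then d
    else
      let iv := PySem.List.pyGetD iRow (j : Int) 0
      pvRowA mzRow iRow (j + 1)
        (if d.contains mzv then d.insert mzv (d.getD mzv 0 + iv) else d.insert mzv iv)
  else d
termination_by mzRow.length - j

def sum_spectrum (mz_array : List (List Int)) (i_array : List (List Int)) : List Int × List Int :=
  let ts := (PySem.List.pyRange 0 (mz_array.length : Int)).foldl
      (fun d i => pvRowA (PySem.List.pyGetD mz_array i []) (PySem.List.pyGetD i_array i []) 0 d)
      PySem.Dict.empty
  let ts2 := PySem.Dict.ofList (PySem.List.sorted2 ts.items (fun p => p.1) (fun p => p.2))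
  (PySem.List.slice ts2.keys (some 0) (some 1000), PySem.List.slice ts2.values (some 0) (some 1000))

-- ===== PORT B =====
-- inner loop 'for j, (mz, iv) in enumerate(zip(mz_row, i_row)): …' with its break
def pvRowB : List (Int × Int) → Nat → List (Int × Int)
  | [], _ => []
  | (mzv, iv) :: rest, j =>
      if mzv == 0 && (j != 0) then [] else (mzv, iv) :: pvRowB rest (j + 1)

-- grouping loop: current run (k, s), emit on key change
def pvGroup (k s : Int) : List (Int × Int) → List (Int × Int)
  | [] => [(k, s)]
  | (m, v) :: rest => if m == k then pvGroup k (s + v) rest else (k, s) :: pvGroup m v rest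

def sum_spectrum_alt (mz_array : List (List Int)) (i_array : List (List Int)) : List Int × List Int :=
  let pairs := (mz_array.zip i_array).foldl (fun acc ri => acc ++ pvRowB (ri.1.zip ri.2) 0) []
  match PySem.List.sorted pairs (fun p => p.1) with
  | [] => ([], [])
  | (k, v) :: rest =>
    let grouped := (pvGroup k v rest).take 1000
    (grouped.map (fun p => p.1), grouped.map (fun p => p.2))

-- ===== PRECONDITION & SPEC =====
-- number of reads A performs from a row of i_array: index 0, then indices until the first 0 entry
def pvReads : List Int → Nat
  | [] => 0
  | _ :: t => 1 + (t.takeWhile (fun x => !(x == 0))).length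

-- Pre_ excludes the inputs on which A raises IndexError: i_array shorter than mz_array,
-- or a row of i_array shorter than the prefix of the mz row that A reads; the length
-- clause is marginally stricter than A (mz rows past the end of i_array that are EMPTY
-- are never read, e.g. the cited input ([[]], []), where A and B agree anyway).
def Pre_sum_spectrum (mz_array : List (List Int)) (i_array : List (List Int)) : Prop :=
  mz_array.length ≤ i_array.length ∧ ∀ p ∈ mz_array.zip i_array, pvReads p.1 ≤ p.2.length
instance (mz_array : List (List Int)) (i_array : List (List Int)) : Decidable (Pre_sum_spectrum mz_array i_array) := by unfold Pre_sum_spectrum; infer_instance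

def pvWitness_sum_spectrum : List (List Int) × List (List Int) := ([[1, 2], [2, 0, 3]], [[3, 4], [5, 6]])

def Spec_sum_spectrum (mz_array : List (List Int)) (i_array : List (List Int)) (out : List Int × List Int) : Prop := out = sum_spectrum_alt mz_array i_array
instance (mz_array : List (List Int)) (i_array : List (List Int)) (out : List Int × List Int) : Decidable (Spec_sum_spectrum mz_array i_array out) := by unfold Spec_sum_spectrum; infer_instance

-- ===== CLAIM (what is proved, stated in full; the proofs are below) =====
def Claim_equal_sum_spectrum : Prop := ∀ (mz_array : List (List Int)) (i_array : List (List Int)), Dom_sum_spectrum mz_array i_array → Pre_sum_spectrum mz_array i_array → Spec_sum_spectrum mz_array i_array (sum_spectrum mz_array i_array)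

-- ===== LEMMAS AND PROOFS =====

-- the dict-update step A performs for one event (mz value, intensity)
def pvStep (d : PySem.Dict Int Int) (p : Int × Int) : PySem.Dict Int Int :=
  if d.contains p.1 then d.insert p.1 (d.getD p.1 0 + p.2) else d.insert p.1 p.2

-- total intensity of key k in an event list
def pvSum (E : List (Int × Int)) (k : Int) : Int :=
  ((E.filter (fun p => p.1 == k)).map (fun p => p.2)).sum

-- the distinct keys of E in increasing order
def pvKeys (E : List (Int × Int)) : List Int :=
  PySem.List.sorted (PySem.Set.ofList (E.map (fun p => p.1))) (fun k => k)

-- canonical result both programs compute: sorted distinct keys paired with their sums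
def pvCanon (E : List (Int × Int)) : List (Int × Int) :=
  (pvKeys E).map (fun k => (k, pvSum E k))

def pvGroupTop : List (Int × Int) → List (Int × Int)
  | [] => []
  | (k, v) :: rest => pvGroup k v rest

-- index characterisation of pvReads (via its takeWhile part)
lemma pvTw_char (t : List Int) (i : Nat) :
    (i < (t.takeWhile (fun x => !(x == 0))).length) ↔
      (i < t.length ∧ ∀ i' (_ : i' < t.length), i' ≤ i → t[i'] ≠ 0) := by
  induction t generalizing i with
  | nil => simp
  | cons x s ih =>
    by_cases hx : x = 0
    · subst hx
      simp only [List.takeWhile_cons]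
      constructor
      · intro h
        simp only [beq_self_eq_true, Bool.not_true] at h
        simp at h
      · rintro ⟨-, h⟩
        exact absurd rfl (h 0 (by simp) (by omega))
    · have hxb : (!(x == 0)) = true := by simp [hx]
      simp only [List.takeWhile_cons, hxb, if_true]
      cases i with
      | zero =>
        constructor
        · intro _
          refine ⟨by simp, ?_⟩
          intro i' h1 h2
          interval_cases i'; simpa
        · intro _; simp
      | succ m =>
        constructor
        · intro h
          have h' := (ih m).mp (by simpa using h)
          refine ⟨by simp; omega, ?_⟩
          intro i' h1 h2
          cases i' with
          | zero => simpa
          | succ n =>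
            simp only [List.getElem_cons_succ]
            exact h'.2 n (by simpa using h1) (by omega)
        · rintro ⟨h1, h2⟩
          have : m < (s.takeWhile (fun x => !(x == 0))).length := by
            refine (ih m).mpr ⟨by simp at h1; omega, ?_⟩
            intro i' hlt hle
            have := h2 (i' + 1) (by simp; omega) (by omega)
            simpa using this
          simpa using this

lemma pvReads_char (l : List Int) (j : Nat) :
    (j < pvReads l) ↔
      (j < l.length ∧ ∀ j' (_ : j' < l.length), 0 < j' → j' ≤ j → l[j'] ≠ 0) := by
  cases l with
  | nil => simp [pvReads]
  | cons a t =>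
    cases j with
    | zero =>
      simp only [pvReads]
      constructor
      · intro _
        refine ⟨by simp, ?_⟩
        intro j' _ h1 h2; omega
      · intro _; omega
    | succ m =>
      simp only [pvReads]
      constructor
      · intro h
        have h' := (pvTw_char t m).mp (by omega)
        refine ⟨by simp; omega, ?_⟩
        intro j' h1 h2 h3
        cases j' with
        | zero => omega
        | succ n =>
          simp only [List.getElem_cons_succ]
          exact h'.2 n (by simpa using h1) (by omega)
      · rintro ⟨h1, h2⟩
        have : m < (t.takeWhile (fun x => !(x == 0))).length := by
          refine (pvTw_char t m).mpr ⟨by simp at h1; omega, ?_⟩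
          intro i' hlt hle
          have := h2 (i' + 1) (by simp; omega) (by omega) (by omega)
          simpa using this
        omega

-- A's inner loop produces the same dict as folding pvStep over B's event list of the row
lemma pvRowA_eq (mzRow iRow : List Int) (hR : pvReads mzRow ≤ iRow.length) :
    ∀ n j d, mzRow.length - j ≤ n → j ≤ pvReads mzRow →
      pvRowA mzRow iRow j d = (pvRowB ((mzRow.zip iRow).drop j) j).foldl pvStep d := by
  intro n
  induction n with
  | zero =>
    intro j d hn _
    rw [pvRowA]
    rw [dif_neg (by omega : ¬ j < mzRow.length)]
    rw [List.drop_eq_nil_of_le (by simp [List.length_zip]; omega)]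
    rfl
  | succ n ih =>
    intro j d hn hj
    rw [pvRowA]
    by_cases hlt : j < mzRow.length
    · rw [dif_pos hlt]
      have hmz : PySem.List.pyGetD mzRow (j : Int) 0 = mzRow[j] := by
        rw [PySem.List.pyGetD_natCast, List.getD_eq_getElem _ _ hlt]
      by_cases hbr : (mzRow[j] == 0 && (j != 0)) = true
      · rw [if_pos (by rw [hmz]; exact hbr)]
        by_cases hjr : j < iRow.length
        · have hz : j < (mzRow.zip iRow).length := by simp [List.length_zip]; omega
          rw [List.drop_eq_getElem_cons hz, List.getElem_zip]
          rw [show pvRowB ((mzRow[j], iRow[j]) :: List.drop (j + 1) (mzRow.zip iRow)) j = [] by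
            simp only [pvRowB]; rw [if_pos hbr]]
          rfl
        · rw [List.drop_eq_nil_of_le (by simp [List.length_zip]; omega)]
          rfl
      · rw [if_neg (by rw [hmz]; exact hbr)]
        have hjlt : j < pvReads mzRow := by
          rw [pvReads_char]
          refine ⟨hlt, ?_⟩
          intro j' hlen hpos hle
          rcases Nat.lt_or_ge j' j with hlt' | hge'
          · rcases Nat.eq_zero_or_pos j with h0 | h0
            · omega
            · have hchar := (pvReads_char mzRow (j - 1)).mp (by omega)
              exact hchar.2 j' hlen hpos (by omega)
          · have : j' = j := by omega
            subst this
            simp only [Bool.and_eq_true, beq_iff_eq, bne_iff_ne, ne_eq] at hbr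
            intro hz0
            exact hbr ⟨hz0, by omega⟩
        have hjr : j < iRow.length := lt_of_lt_of_le hjlt hR
        have hz : j < (mzRow.zip iRow).length := by simp [List.length_zip]; omega
        have hiv : PySem.List.pyGetD iRow (j : Int) 0 = iRow[j] := by
          rw [PySem.List.pyGetD_natCast, List.getD_eq_getElem _ _ hjr]
        rw [List.drop_eq_getElem_cons hz, List.getElem_zip]
        rw [show pvRowB ((mzRow[j], iRow[j]) :: List.drop (j + 1) (mzRow.zip iRow)) j
              = (mzRow[j], iRow[j]) :: pvRowB (List.drop (j + 1) (mzRow.zip iRow)) (j + 1) by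
          simp only [pvRowB]; rw [if_neg hbr]]
        rw [List.foldl_cons]
        rw [ih (j + 1) _ (by omega) (by omega)]
        congr 1
        rw [hmz, hiv]
        rfl
    · rw [dif_neg hlt]
      rw [List.drop_eq_nil_of_le (by simp [List.length_zip]; omega)]
      rfl

lemma pvRowA_eq0 (mzRow iRow : List Int) (hR : pvReads mzRow ≤ iRow.length) (d : PySem.Dict Int Int) :
    pvRowA mzRow iRow 0 d = (pvRowB (mzRow.zip iRow) 0).foldl pvStep d := by
  have h := pvRowA_eq mzRow iRow hR mzRow.length 0 d (by omega) (by omega)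
  simpa using h

-- folding row-wise event segments = folding the concatenated event list
lemma pvFoldl_segments :
    ∀ (rs : List (List Int × List Int)) (d : PySem.Dict Int Int),
      rs.foldl (fun d ri => (pvRowB (ri.1.zip ri.2) 0).foldl pvStep d) d
        = (rs.foldl (fun acc ri => acc ++ pvRowB (ri.1.zip ri.2) 0) []).foldl pvStep d := by
  intro rs
  rw [PySem.List.foldl_append_eq_flatMap]
  induction rs with
  | nil => intro d; simp
  | cons r rt ih =>
    intro d
    simp only [List.foldl_cons, List.flatMap_cons, List.foldl_append]
    rw [ih]
    simp

-- A's outer loop over indices = fold over the zipped rows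
lemma pvOuter (mzs ias : List (List Int)) (h1 : mzs.length ≤ ias.length)
    (h2 : ∀ p ∈ mzs.zip ias, pvReads p.1 ≤ p.2.length) :
    ∀ d, (PySem.List.pyRange 0 (mzs.length : Int)).foldl
        (fun d i => pvRowA (PySem.List.pyGetD mzs i []) (PySem.List.pyGetD ias i []) 0 d) d
      = (mzs.zip ias).foldl (fun d ri => (pvRowB (ri.1.zip ri.2) 0).foldl pvStep d) d := by
  induction mzs generalizing ias with
  | nil => intro d; simp
  | cons m mt ih =>
    cases ias with
    | nil => simp at h1
    | cons a it =>
      intro d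
      rw [show ((m :: mt).length : Int) = ((mt.length + 1 : Nat) : Int) by simp]
      rw [PySem.List.pyRange_zero_natCast, List.range_succ_eq_map, List.map_cons, List.map_map]
      simp only [List.foldl_cons, List.foldl_map, List.zip_cons_cons, Function.comp_def]
      have hhead : PySem.List.pyGetD (m :: mt) ((0 : Nat) : Int) [] = m := by
        rw [PySem.List.pyGetD_natCast]; rfl
      have hhead2 : PySem.List.pyGetD (a :: it) ((0 : Nat) : Int) [] = a := by
        rw [PySem.List.pyGetD_natCast]; rfl
      rw [hhead, hhead2]
      have hbody : ∀ (d' : PySem.Dict Int Int) (k : Nat),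
          pvRowA (PySem.List.pyGetD (m :: mt) ((k.succ : Nat) : Int) [])
                 (PySem.List.pyGetD (a :: it) ((k.succ : Nat) : Int) []) 0 d'
            = pvRowA (PySem.List.pyGetD mt ((k : Nat) : Int) [])
                     (PySem.List.pyGetD it ((k : Nat) : Int) []) 0 d' := by
        intro d' k
        rw [PySem.List.pyGetD_natCast, PySem.List.pyGetD_natCast,
            PySem.List.pyGetD_natCast, PySem.List.pyGetD_natCast,
            List.getD_cons_succ, List.getD_cons_succ]
      rw [PySem.List.foldl_congr_mem (List.range mt.length) _
            (fun d (k : Nat) => pvRowA (PySem.List.pyGetD mt ((k : Nat) : Int) [])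
                               (PySem.List.pyGetD it ((k : Nat) : Int) []) 0 d) _
            (fun acc x _ => hbody acc x)]
      rw [pvRowA_eq0 m a (h2 (m, a) (by simp)) d]
      have ihx := ih it (by simpa using h1) (fun p hp => h2 p (by simp [hp]))
        ((pvRowB (m.zip a) 0).foldl pvStep d)
      rw [PySem.List.pyRange_zero_natCast, List.foldl_map] at ihx
      exact ihx

lemma pvStep_eq :
    pvStep = fun d p => d.insert p.1 (if d.contains p.1 then d.getD p.1 0 + p.2 else p.2) := by
  funext d p
  by_cases h : d.contains p.1 <;> simp [pvStep, h]

lemma pvFold_keys (E : List (Int × Int)) :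
    (E.foldl pvStep PySem.Dict.empty).keys = PySem.Set.ofList (E.map (fun p => p.1)) := by
  rw [pvStep_eq]
  rw [PySem.Dict.keys_foldl_insert_key E (fun p => p.1)
        (fun d p => if d.contains p.1 then d.getD p.1 0 + p.2 else p.2) PySem.Dict.empty]
  rfl

lemma pvFold_nodup (E : List (Int × Int)) : (E.foldl pvStep PySem.Dict.empty).keys.Nodup := by
  rw [pvFold_keys]; exact PySem.Set.nodup_ofList _

lemma pvFold_getD (E : List (Int × Int)) :
    ∀ d k, (E.foldl pvStep d).getD k 0 = d.getD k 0 + pvSum E k := by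
  induction E with
  | nil => intro d k; simp [pvSum]
  | cons p t ih =>
    intro d k
    simp only [List.foldl_cons]
    rw [ih]
    have hstep : (pvStep d p).getD k 0 = (if k = p.1 then d.getD k 0 + p.2 else d.getD k 0) := by
      by_cases hk : k = p.1
      · by_cases hc : d.contains p.1
        · rw [pvStep, if_pos hc, PySem.Dict.getD_insert, if_pos hk, if_pos hk, hk]
        · rw [pvStep, if_neg hc, PySem.Dict.getD_insert, if_pos hk, if_pos hk, hk,
              PySem.Dict.getD_of_not_contains d 0 (by simpa using hc)]
          ring
      · by_cases hc : d.contains p.1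
        · rw [pvStep, if_pos hc, PySem.Dict.getD_insert, if_neg hk, if_neg hk]
        · rw [pvStep, if_neg hc, PySem.Dict.getD_insert, if_neg hk, if_neg hk]
    have hsum : pvSum (p :: t) k = (if k = p.1 then p.2 + pvSum t k else pvSum t k) := by
      simp only [pvSum, List.filter_cons]
      by_cases hk : k = p.1
      · simp only [beq_iff_eq, if_pos hk.symm, if_pos hk, List.map_cons, List.sum_cons]
      · simp only [beq_iff_eq, if_neg (show ¬ p.1 = k from fun h => hk h.symm), if_neg hk]
    rw [hstep, hsum]
    by_cases hk : k = p.1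
    · rw [if_pos hk, if_pos hk]; ring
    · rw [if_neg hk, if_neg hk]

lemma pvFold_items (E : List (Int × Int)) :
    (E.foldl pvStep PySem.Dict.empty).items
      = (PySem.Set.ofList (E.map (fun p => p.1))).map (fun k => (k, pvSum E k)) := by
  rw [PySem.Dict.items_eq_map_keys _ (pvFold_nodup E) 0, pvFold_keys]
  apply List.map_congr_left
  intro k _
  rw [pvFold_getD]
  simp

lemma pvInsertBy_congr (b1 b2 : (Int × Int) → (Int × Int) → Bool) (x : Int × Int) :
    ∀ acc, (∀ c ∈ acc, b1 x c = b2 x c) →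
      PySem.List.insertBy b1 x acc = PySem.List.insertBy b2 x acc := by
  intro acc
  induction acc with
  | nil => intro _; rfl
  | cons y ys ih =>
    intro h
    have hy : b1 x y = b2 x y := h y (by simp)
    simp only [PySem.List.insertBy, hy]
    by_cases hb : b2 x y
    · simp [hb]
    · simp only [hb]
      rw [ih (fun c hc => h c (by simp [hc]))]

lemma pvFoldl_insertBy_congr (S : List (Int × Int)) (b1 b2 : (Int × Int) → (Int × Int) → Bool)
    (hb : ∀ a ∈ S, ∀ c ∈ S, b1 a c = b2 a c) :
    ∀ (xs : List (Int × Int)), (∀ a ∈ xs, a ∈ S) → ∀ acc, (∀ c ∈ acc, c ∈ S) →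
      xs.foldl (fun acc x => PySem.List.insertBy b1 x acc) acc
        = xs.foldl (fun acc x => PySem.List.insertBy b2 x acc) acc := by
  intro xs
  induction xs with
  | nil => intro _ acc _; rfl
  | cons x xt ih =>
    intro hxs acc hacc
    simp only [List.foldl_cons]
    have hx : x ∈ S := hxs x (by simp)
    rw [pvInsertBy_congr b1 b2 x acc (fun c hc => hb x hx c (hacc c hc))]
    exact ih (fun a ha => hxs a (by simp [ha])) _
      (fun c hc => by
        rcases (PySem.List.mem_insertBy b2 x c acc).mp hc with h | h
        · subst h; exact hx
        · exact hacc c h)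

-- Python's tuple sort = sort by first component when first components are distinct
lemma pvSorted2_eq (l : List (Int × Int)) (hnd : (l.map (fun p => p.1)).Nodup) :
    PySem.List.sorted2 l (fun p => p.1) (fun p => p.2) = PySem.List.sorted l (fun p => p.1) := by
  have hb : ∀ a ∈ l, ∀ b ∈ l,
      (decide (a.1 < b.1) || (!decide (b.1 < a.1) && decide (a.2 < b.2))) = decide (a.1 < b.1) := by
    intro a ha b hbm
    rcases lt_trichotomy a.1 b.1 with h | h | h
    · simp [h]
    · have hab : a = b := List.inj_on_of_nodup_map hnd ha hbm h
      subst hab; simp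
    · have h1 : ¬ a.1 < b.1 := lt_asymm h
      simp [h1, h]
  simp only [PySem.List.sorted2, PySem.List.sorted, if_neg (by decide : ¬ (false = true))]
  exact pvFoldl_insertBy_congr l _ _ hb l (fun _ h => h) [] (by simp)

-- the A side: the sorted dict items are the canonical list
lemma pvA_sorted (E : List (Int × Int)) :
    PySem.List.sorted2 (E.foldl pvStep PySem.Dict.empty).items (fun p => p.1) (fun p => p.2)
      = pvCanon E := by
  have hnd : ((E.foldl pvStep PySem.Dict.empty).items.map (fun p => p.1)).Nodup := by
    rw [pvFold_items]
    simpa [List.map_map, Function.comp_def] using PySem.Set.nodup_ofList (E.map (fun p => p.1))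
  rw [pvSorted2_eq _ hnd, pvFold_items]
  apply PySem.List.sorted_eq_of_perm_of_pairwise_lt
  · exact (PySem.List.sorted_perm _ _ _).map _
  · exact List.Pairwise.map _ (fun a b hab => hab)
      (PySem.List.sorted_ofList_pairwise_lt (E.map (fun p => p.1)))

lemma pvCanon_nodup_fst (E : List (Int × Int)) : ((pvCanon E).map (fun p => p.1)).Nodup := by
  have h : ((pvCanon E).map (fun p => p.1)) = pvKeys E := by
    simp [pvCanon, List.map_map, Function.comp_def]
  rw [h]
  exact ((PySem.List.sorted_perm _ _ _).nodup_iff).mpr (PySem.Set.nodup_ofList _)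

lemma pvOfList_items (L : List (Int × Int)) (hnd : (L.map (fun p => p.1)).Nodup) :
    (PySem.Dict.ofList L).items = L := by
  have h := PySem.Dict.items_foldl_insert_fresh L (fun p : Int × Int => p.1) (fun p : Int × Int => p.2)
      PySem.Dict.empty (fun a _ => PySem.Dict.contains_empty _) hnd
  simpa [PySem.Dict.ofList, PySem.Dict.update] using h

lemma pvGroup_spec (zs : List (Int × Int)) :
    ∀ k s, zs.Pairwise (fun a b => a.1 ≤ b.1) → (∀ p ∈ zs, k ≤ p.1) →
      pvGroup k s zs = (k, s + pvSum zs k) :: pvGroupTop (zs.filter (fun p => !(p.1 == k))) := by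
  induction zs with
  | nil => intro k s _ _; simp [pvGroup, pvSum, pvGroupTop]
  | cons hd rest ih =>
    obtain ⟨m, v⟩ := hd
    intro k s hp hge
    obtain ⟨hhd, htl⟩ := List.pairwise_cons.mp hp
    by_cases hm : m = k
    · subst hm
      rw [show pvGroup m s ((m, v) :: rest) = pvGroup m (s + v) rest by simp [pvGroup]]
      rw [ih m (s + v) htl (fun p hq => hge p (by simp [hq]))]
      have h1 : pvSum ((m, v) :: rest) m = v + pvSum rest m := by
        simp [pvSum]
      have h2 : ((m, v) :: rest).filter (fun p => !(p.1 == m)) = rest.filter (fun p => !(p.1 == m)) := by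
        simp
      rw [h1, h2, add_assoc]
    · have hkm : k < m := lt_of_le_of_ne (hge (m, v) (by simp)) (fun h => hm h.symm)
      have hne : ∀ p ∈ (m, v) :: rest, p.1 ≠ k := by
        intro p hmem
        rcases List.mem_cons.mp hmem with rfl | h
        · simpa using hm
        · exact fun hk => absurd (hhd p h) (by rw [← hk] at hkm; omega)
      rw [show pvGroup k s ((m, v) :: rest) = (k, s) :: pvGroup m v rest by
        simp [pvGroup, fun h : m = k => hm h]]
      have h1 : pvSum ((m, v) :: rest) k = 0 := by
        have : ((m, v) :: rest).filter (fun p => p.1 == k) = [] := by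
          rw [List.filter_eq_nil_iff]
          intro p hpm
          simpa using hne p hpm
        simp [pvSum, this]
      have h2 : ((m, v) :: rest).filter (fun p => !(p.1 == k)) = (m, v) :: rest := by
        rw [List.filter_eq_self]
        intro p hpm
        simpa using hne p hpm
      rw [h1, h2, add_zero]
      rfl

lemma pvKeys_cons (k : Int) (v : Int) (rest : List (Int × Int)) (hge : ∀ p ∈ rest, k ≤ p.1) :
    pvKeys ((k, v) :: rest) = k :: pvKeys (rest.filter (fun p => !(p.1 == k))) := by
  unfold pvKeys
  apply PySem.List.sorted_eq_of_perm_of_pairwise_lt _ _ (fun x => x)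
  · refine (List.perm_ext_iff_of_nodup ?_ (PySem.Set.nodup_ofList _)).mpr ?_
    · refine List.nodup_cons.mpr ⟨?_, ((PySem.List.sorted_perm _ _ _).nodup_iff).mpr (PySem.Set.nodup_ofList _)⟩
      intro hmem
      rw [PySem.List.mem_sorted, PySem.Set.mem_ofList, List.mem_map] at hmem
      obtain ⟨p, hpf, hpk⟩ := hmem
      have := (List.mem_filter.mp hpf).2
      rw [hpk] at this
      simp at this
    · intro a
      rw [List.mem_cons, PySem.List.mem_sorted, PySem.Set.mem_ofList, PySem.Set.mem_ofList]
      simp only [List.mem_map, List.mem_filter, List.mem_cons]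
      constructor
      · rintro (rfl | ⟨p, ⟨hp, -⟩, rfl⟩)
        · exact ⟨(a, v), Or.inl rfl, rfl⟩
        · exact ⟨p, Or.inr hp, rfl⟩
      · rintro ⟨p, (rfl | hp), rfl⟩
        · exact Or.inl rfl
        · by_cases hpk : p.1 = k
          · exact Or.inl hpk
          · exact Or.inr ⟨p, ⟨hp, by simp [hpk]⟩, rfl⟩
  · refine List.pairwise_cons.mpr ⟨?_, PySem.List.sorted_ofList_pairwise_lt _⟩
    intro b hb
    rw [PySem.List.mem_sorted, PySem.Set.mem_ofList, List.mem_map] at hb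
    obtain ⟨p, hpf, rfl⟩ := hb
    obtain ⟨hpr, hpk⟩ := List.mem_filter.mp hpf
    exact lt_of_le_of_ne (hge p hpr) (fun h => by simp [← h] at hpk)

lemma pvCanon_cons (k : Int) (v : Int) (rest : List (Int × Int)) (hge : ∀ p ∈ rest, k ≤ p.1) :
    pvCanon ((k, v) :: rest)
      = (k, v + pvSum rest k) :: pvCanon (rest.filter (fun p => !(p.1 == k))) := by
  unfold pvCanon
  rw [pvKeys_cons k v rest hge, List.map_cons]
  congr 1
  · have : pvSum ((k, v) :: rest) k = v + pvSum rest k := by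
      simp [pvSum]
    rw [this]
  · apply List.map_congr_left
    intro k' hk'
    have hkk : k' ≠ k := by
      unfold pvKeys at hk'
      rw [PySem.List.mem_sorted, PySem.Set.mem_ofList, List.mem_map] at hk'
      obtain ⟨p, hpf, rfl⟩ := hk'
      have := (List.mem_filter.mp hpf).2
      exact fun h => by simp [h] at this
    congr 1
    have h1 : pvSum ((k, v) :: rest) k' = pvSum rest k' := by
      simp only [pvSum, List.filter_cons, beq_iff_eq,
        if_neg (show ¬ k = k' from fun h => hkk h.symm)]
    have h2 : pvSum (rest.filter (fun p => !(p.1 == k))) k' = pvSum rest k' := by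
      simp only [pvSum, List.filter_filter]
      congr 1
      apply congrArg
      apply List.filter_congr
      intro p _
      by_cases hp : p.1 = k'
      · simp [hp, hkk]
      · simp [hp]
    rw [h1, h2]

lemma pvGroupTop_spec :
    ∀ n (zs : List (Int × Int)), zs.length ≤ n → zs.Pairwise (fun a b => a.1 ≤ b.1) →
      pvGroupTop zs = pvCanon zs := by
  intro n
  induction n with
  | zero =>
    intro zs hlen _
    rw [show zs = [] from List.length_eq_zero_iff.mp (by omega)]
    rfl
  | succ n ih =>
    intro zs hlen hp
    cases zs with
    | nil => rfl
    | cons hd rest =>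
      obtain ⟨k, v⟩ := hd
      obtain ⟨hhd, htl⟩ := List.pairwise_cons.mp hp
      have hge : ∀ p ∈ rest, k ≤ p.1 := fun p hq => hhd p hq
      rw [show pvGroupTop ((k, v) :: rest) = pvGroup k v rest from rfl]
      rw [pvGroup_spec rest k v htl hge]
      rw [ih (rest.filter (fun p => !(p.1 == k)))
            (le_trans (List.length_filter_le _ _) (by simp at hlen; omega))
            (htl.filter (fun p => !(p.1 == k)))]
      rw [← pvCanon_cons k v rest hge]

lemma pvCanon_perm (S E : List (Int × Int)) (h : S.Perm E) : pvCanon S = pvCanon E := by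
  have hk : pvKeys S = pvKeys E := by
    apply PySem.List.sorted_eq_sorted_of_perm _ _ _ (fun a b hab => hab)
    refine (List.perm_ext_iff_of_nodup (PySem.Set.nodup_ofList _) (PySem.Set.nodup_ofList _)).mpr ?_
    intro a
    simp only [PySem.Set.mem_ofList]
    exact (h.map _).mem_iff
  unfold pvCanon
  rw [hk]
  apply List.map_congr_left
  intro k _
  have : (S.filter (fun p => p.1 == k)).Perm (E.filter (fun p => p.1 == k)) := h.filter _
  simp only [pvSum]
  rw [(this.map (fun p => p.2)).sum_eq]

-- ===== VERDICT (by name: the statement is the Claim_ definition above) =====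
theorem sum_spectrum_spec : Claim_equal_sum_spectrum := by
  intro mzs ias _hdom hpre
  obtain ⟨h1, h2⟩ := hpre
  unfold Spec_sum_spectrum sum_spectrum sum_spectrum_alt
  dsimp only
  set E := (mzs.zip ias).foldl (fun acc ri => acc ++ pvRowB (ri.1.zip ri.2) 0) ([] : List (Int × Int)) with hE
  have hts : (PySem.List.pyRange 0 (mzs.length : Int)).foldl
      (fun d i => pvRowA (PySem.List.pyGetD mzs i []) (PySem.List.pyGetD ias i []) 0 d)
      PySem.Dict.empty = E.foldl pvStep PySem.Dict.empty := by
    rw [pvOuter mzs ias h1 h2 PySem.Dict.empty, pvFoldl_segments, hE]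
  rw [hts, pvA_sorted E, PySem.Dict.keys, PySem.Dict.values, pvOfList_items (pvCanon E) (pvCanon_nodup_fst E)]
  rw [PySem.List.slice_zero_start, PySem.List.slice_zero_start,
      PySem.List.slice_to _ (by norm_num), PySem.List.slice_to _ (by norm_num)]
  cases hS : PySem.List.sorted E (fun p => p.1) with
  | nil =>
    have hE0 : E = [] := (PySem.List.sorted_eq_nil_iff E _ false).mp hS
    rw [hE0]
    rfl
  | cons hd rest =>
    obtain ⟨k, v⟩ := hd
    have hgt : pvGroup k v rest = pvCanon E := by
      have h3 : pvGroupTop (PySem.List.sorted E (fun p => p.1))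
          = pvCanon (PySem.List.sorted E (fun p => p.1)) :=
        pvGroupTop_spec (PySem.List.sorted E (fun p => p.1)).length _ le_rfl
          (PySem.List.sorted_pairwise E (fun p => p.1))
      rw [pvCanon_perm _ _ (PySem.List.sorted_perm E (fun p => p.1) false)] at h3
      rw [hS] at h3
      exact h3
    dsimp only
    rw [hgt, ← List.map_take, ← List.map_take, show Int.toNat 1000 = 1000 from rfl]
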